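-- pv_equiv track=rewrite | github.com/daniel-reich/ubiquitous-fiesta | tbz5ji3ocwzAeLQNa_19.py | exit_maze
-- ===== SOURCE A (Python) =====
-- def exit_maze(maze, directions):
--   start_row = 9
--   start_col = 8
--   try:
--     for eachdirection in directions:
--       if maze[start_row][start_col] == 1:
--         return 'Dead'
--       if maze[start_row][start_col] == 3:
--         return 'Finish'
--       if eachdirection == 'N':
--         start_row -= 1
--       elif eachdirection == 'W':
--         start_col -= 1
--       elif eachdirection == 'E':
--         start_col += 1
--       elif eachdirection == 'S':
--         start_row += 1
--     if maze[start_row][start_col] == 3: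
--       return 'Finish'
--     elif maze[start_row][start_col] == 1:
--       return 'Dead'
--     else:
--       return 'Lost'
--   except:
--     return 'Dead'
-- ===== SOURCE B (Python) =====
-- def exit_maze(maze, directions):
--     # Two-pass: first compute the full path of positions (no maze access),
--     # then scan the path once for the first deadly/finish cell.
--     deltas = {'N': (-1, 0), 'W': (0, -1), 'E': (0, 1), 'S': (1, 0)}
--     positions = [(9, 8)]
--     for d in directions:
--         dr, dc = deltas.get(d, (0, 0))
--         r, c = positions[-1]
--         positions.append((r + dr, c + dc))
--     try:
--         for r, c in positions:
--             cell = maze[r][c]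
--             if cell == 1:
--                 return 'Dead'
--             if cell == 3:
--                 return 'Finish'
--         return 'Lost'
--     except:
--         return 'Dead'
-- ===== Notes on version B (the rewrite author's own statement) =====
-- stated objective: alternative
-- what changed: Single interleaved walk-and-check loop replaced by a two-pass decomposition: first build the list of visited positions from the directions (never touching the maze), then scan that path once for the first 1/3 cell, with a dict of deltas replacing the if/elif direction chain.
import Mathlib
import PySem

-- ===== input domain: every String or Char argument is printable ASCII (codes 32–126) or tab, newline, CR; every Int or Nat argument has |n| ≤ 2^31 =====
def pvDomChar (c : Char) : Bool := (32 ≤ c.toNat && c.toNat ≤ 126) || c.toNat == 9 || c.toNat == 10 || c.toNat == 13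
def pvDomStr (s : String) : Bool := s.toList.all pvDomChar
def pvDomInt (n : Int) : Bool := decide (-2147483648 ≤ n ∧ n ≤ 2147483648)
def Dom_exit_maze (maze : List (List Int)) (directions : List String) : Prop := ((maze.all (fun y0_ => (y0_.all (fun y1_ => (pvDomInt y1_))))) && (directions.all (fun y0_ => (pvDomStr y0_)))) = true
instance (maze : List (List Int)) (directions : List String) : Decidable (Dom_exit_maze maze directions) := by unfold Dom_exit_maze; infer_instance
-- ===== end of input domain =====

-- B rebuilds the same result by a two-pass decomposition (path first, then one scan of the maze); objective: alternative decomposition, same cost.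
-- ===== PORT A =====
-- maze[r][c] with Python negative-index wrap; none = IndexError (A's bare except -> 'Dead')
def pvCell (maze : List (List Int)) (r c : Int) : Option Int :=
  (PySem.List.pyGet? maze r).bind (fun row => PySem.List.pyGet? row c)

def exit_maze_go (maze : List (List Int)) (dirs : List String) (r c : Int) : String :=
  match dirs with
  | [] =>
    match pvCell maze r c with
    | none => "Dead"
    | some v => if v = 3 then "Finish" else if v = 1 then "Dead" else "Lost"
  | d :: rest =>
    match pvCell maze r c with
    | none => "Dead"
    | some v =>
      if v = 1 then "Dead"
      else if v = 3 then "Finish"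
      else if d = "N" then exit_maze_go maze rest (r - 1) c
      else if d = "W" then exit_maze_go maze rest r (c - 1)
      else if d = "E" then exit_maze_go maze rest r (c + 1)
      else if d = "S" then exit_maze_go maze rest (r + 1) c
      else exit_maze_go maze rest r c

def exit_maze (maze : List (List Int)) (directions : List String) : String :=
  exit_maze_go maze directions 9 8

-- ===== PORT B =====
-- deltas.get(d, (0, 0))
def pvDelta (d : String) : Int × Int :=
  if d = "N" then (-1, 0)
  else if d = "W" then (0, -1)
  else if d = "E" then (0, 1)
  else if d = "S" then (1, 0)
  else (0, 0)

-- pass 1: the list of visited positions, maze never touched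
def pvPositions (dirs : List String) (p : Int × Int) : List (Int × Int) :=
  match dirs with
  | [] => [p]
  | d :: rest => p :: pvPositions rest (p.1 + (pvDelta d).1, p.2 + (pvDelta d).2)

-- pass 2: scan the path for the first 1/3 cell (none on indexing = Python exception -> 'Dead')
def pvScan (maze : List (List Int)) (ps : List (Int × Int)) : String :=
  match ps with
  | [] => "Lost"
  | (r, c) :: rest =>
    match pvCell maze r c with
    | none => "Dead"
    | some v =>
      if v = 1 then "Dead"
      else if v = 3 then "Finish"
      else pvScan maze rest

def exit_maze_alt (maze : List (List Int)) (directions : List String) : String :=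
  pvScan maze (pvPositions directions (9, 8))

-- ===== PRECONDITION & SPEC =====
def Spec_exit_maze (maze : List (List Int)) (directions : List String) (out : String) : Prop := out = exit_maze_alt maze directions
instance (maze : List (List Int)) (directions : List String) (out : String) : Decidable (Spec_exit_maze maze directions out) := by unfold Spec_exit_maze; infer_instance

-- ===== CLAIM (what is proved, stated in full; the proofs are below) =====
def Claim_equal_exit_maze : Prop := ∀ (maze : List (List Int)) (directions : List String), Dom_exit_maze maze directions → Spec_exit_maze maze directions (exit_maze maze directions)

-- ===== LEMMAS AND PROOFS =====
theorem go_eq_scan (maze : List (List Int)) (dirs : List String) :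
    ∀ r c : Int, exit_maze_go maze dirs r c = pvScan maze (pvPositions dirs (r, c)) := by
  induction dirs with
  | nil =>
    intro r c
    simp only [exit_maze_go, pvPositions, pvScan]
    cases pvCell maze r c with
    | none => rfl
    | some v =>
      by_cases h1 : v = 1
      · simp [h1]
      · by_cases h3 : v = 3 <;> simp [h1, h3]
  | cons d rest ih =>
    intro r c
    simp only [exit_maze_go, pvPositions, pvScan]
    cases pvCell maze r c with
    | none => rfl
    | some v =>
      by_cases h1 : v = 1
      · simp [h1]
      · by_cases h3 : v = 3
        · simp [h3]
        · simp only [h1, h3, if_false]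
          by_cases hN : d = "N" <;> by_cases hW : d = "W" <;> by_cases hE : d = "E" <;>
            by_cases hS : d = "S" <;> simp_all [pvDelta, sub_eq_add_neg]

-- ===== VERDICT (by name: the statement is the Claim_ definition above) =====
theorem exit_maze_spec : Claim_equal_exit_maze := by
  intro maze directions _
  unfold Spec_exit_maze exit_maze exit_maze_alt
  exact go_eq_scan maze directions 9 8
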